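-- pv_equiv track=rewrite | github.com/salvobertoncini/Gideon | constraints.py | cardinality_constraint_of_permission
-- ===== SOURCE A (Python) =====
-- def cardinality_constraint_of_permission(individual, max_n):
-- 	summa = 0
-- 	for gene in individual[1]:
-- 		semi_summa = 0
-- 		for allele in gene:
-- 			if allele == '1':
-- 				semi_summa += 1
-- 		if semi_summa > max_n:
-- 			return 1
-- 		summa += semi_summa
--
-- 	return summa
-- ===== SOURCE B (Python) =====
-- def _agg(genes):
-- 	# divide & conquer: returns (total ones, maximum per-gene ones) over a nonempty gene list
-- 	if len(genes) == 1:
-- 		c = genes[0].count('1')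
-- 		return c, c
-- 	mid = len(genes) // 2
-- 	t1, m1 = _agg(genes[:mid])
-- 	t2, m2 = _agg(genes[mid:])
-- 	return t1 + t2, max(m1, m2)
--
-- def cardinality_constraint_of_permission(individual, max_n):
-- 	genes = individual[1]
-- 	if not genes:
-- 		return 0
-- 	total, biggest = _agg(genes)
-- 	return 1 if biggest > max_n else total
-- ===== Notes on version B (the rewrite author's own statement) =====
-- stated objective: alternative
-- what changed: Replaces the fused left-to-right loop with early return by a divide-and-conquer reduction computing the (sum, max) pair of per-gene ones-counts over halves of the list, then decides 1 vs total from the maximum.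
import Mathlib
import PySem

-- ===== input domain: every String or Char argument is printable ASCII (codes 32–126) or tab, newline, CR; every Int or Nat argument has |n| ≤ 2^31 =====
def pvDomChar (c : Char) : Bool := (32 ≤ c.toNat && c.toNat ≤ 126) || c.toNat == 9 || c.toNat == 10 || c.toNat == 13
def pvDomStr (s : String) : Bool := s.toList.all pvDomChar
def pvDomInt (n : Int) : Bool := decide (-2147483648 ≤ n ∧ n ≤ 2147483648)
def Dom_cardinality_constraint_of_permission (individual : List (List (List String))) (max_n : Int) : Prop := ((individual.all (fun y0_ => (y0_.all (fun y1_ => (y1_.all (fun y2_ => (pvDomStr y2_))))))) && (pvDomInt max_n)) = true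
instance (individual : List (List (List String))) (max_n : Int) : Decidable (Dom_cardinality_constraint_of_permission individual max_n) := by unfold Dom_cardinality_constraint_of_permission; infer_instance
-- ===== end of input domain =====

-- B replaces A's fused early-return loop by a divide-and-conquer (sum, max) reduction over halves of the gene list (alternative algorithm; return value only).


-- ===== PORT A =====
-- outer loop of A: running total summa, inner loop counting '1's, early return 1
def pvALoop (genes : List (List String)) (max_n : Int) (summa : Int) : Int :=
  match genes with
  | [] => summa
  | gene :: rest =>
    let semi_summa : Int := gene.foldl (fun s allele => if allele == "1" then s + 1 else s) 0
    if semi_summa > max_n then 1 else pvALoop rest max_n (summa + semi_summa)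

def cardinality_constraint_of_permission (individual : List (List (List String))) (max_n : Int) : Int :=
  pvALoop ((PySem.List.pyGet? individual 1).getD []) max_n 0

-- ===== PORT B =====
-- _agg of Source B: divide & conquer returning (total ones, maximum per-gene ones) over a nonempty
-- gene list.  Python's base case is len == 1; the entry guards the empty list, so len = 0 is
-- unreachable there — the base is written `length ≤ 1` only to make the recursion total.
-- genes[:mid] / genes[mid:] with 0 ≤ mid ≤ len are exactly take/drop.
def pvAgg (genes : List (List String)) : Int × Int :=
  if genes.length ≤ 1 then
    let c : Int := PySem.List.count (genes.headD []) "1"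
    (c, c)
  else
    let r1 := pvAgg (genes.take (genes.length / 2))
    let r2 := pvAgg (genes.drop (genes.length / 2))
    (r1.1 + r2.1, max r1.2 r2.2)
termination_by genes.length
decreasing_by
  · simp only [List.length_take]; omega
  · simp only [List.length_drop]; omega

def cardinality_constraint_of_permission_alt (individual : List (List (List String))) (max_n : Int) : Int :=
  let genes := (PySem.List.pyGet? individual 1).getD []
  if genes.isEmpty then 0
  else
    let r := pvAgg genes
    if r.2 > max_n then 1 else r.1

-- ===== PRECONDITION & SPEC =====
-- A (and B) raise IndexError on individual[1] when the list has fewer than 2 elements; Pre_ excludes exactly those inputs.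
def Pre_cardinality_constraint_of_permission (individual : List (List (List String))) (max_n : Int) : Prop := 2 ≤ individual.length
instance (individual : List (List (List String))) (max_n : Int) : Decidable (Pre_cardinality_constraint_of_permission individual max_n) := by unfold Pre_cardinality_constraint_of_permission; infer_instance
def pvWitness_cardinality_constraint_of_permission : List (List (List String)) × Int := ([[["1"]], [["1", "0"], ["x"]]], 3)
def Spec_cardinality_constraint_of_permission (individual : List (List (List String))) (max_n : Int) (out : Int) : Prop := out = cardinality_constraint_of_permission_alt individual max_n
instance (individual : List (List (List String))) (max_n : Int) (out : Int) : Decidable (Spec_cardinality_constraint_of_permission individual max_n out) := by unfold Spec_cardinality_constraint_of_permission; infer_instance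

-- ===== CLAIM (what is proved, stated in full; the proofs are below) =====
def Claim_equal_cardinality_constraint_of_permission : Prop := ∀ (individual : List (List (List String))) (max_n : Int), Dom_cardinality_constraint_of_permission individual max_n → Pre_cardinality_constraint_of_permission individual max_n → Spec_cardinality_constraint_of_permission individual max_n (cardinality_constraint_of_permission individual max_n)

-- ===== LEMMAS AND PROOFS =====

-- per-gene ones-count, as both sides compute it
def pvC (gene : List String) : Int := PySem.List.count gene "1"

-- the inner counting loop of A equals list.count
theorem pv_semi_eq_count (gene : List String) :
    gene.foldl (fun s allele => if allele == "1" then s + 1 else s) (0 : Int) = pvC gene := by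
  rw [PySem.List.foldl_beq_add_one]
  simp [pvC, PySem.List.count]

-- characterisation of the divide-and-conquer reduction on nonempty input:
-- first component = sum of per-gene counts, second exceeds t iff some count does
theorem pvAgg_spec (genes : List (List String)) (hne : genes ≠ []) :
    (pvAgg genes).1 = (genes.map pvC).sum ∧
      ∀ t : Int, ((pvAgg genes).2 > t ↔ (genes.map pvC).any (fun c => decide (c > t))) := by
  induction genes using pvAgg.induct with
  | case1 genes hlen =>
    match genes, hlen, hne with
    | [g], _, _ =>
      rw [pvAgg]
      simp [pvC]
  | case2 genes hlen ih1 ih2 =>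
    have h1 : genes.take (genes.length / 2) ≠ [] := by
      intro h
      rcases List.take_eq_nil_iff.mp h with h' | h'
      · omega
      · subst h'; simp at hlen
    have h2 : genes.drop (genes.length / 2) ≠ [] := by
      intro h
      have := congrArg List.length h
      rw [List.length_drop] at this
      simp at this
      omega
    obtain ⟨s1, m1⟩ := ih1 h1
    obtain ⟨s2, m2⟩ := ih2 h2
    have hsplit : genes = genes.take (genes.length / 2) ++ genes.drop (genes.length / 2) :=
      (List.take_append_drop _ _).symm
    rw [pvAgg]
    simp only [if_neg (by omega : ¬ genes.length ≤ 1)]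
    refine ⟨?_, ?_⟩
    · conv_rhs => rw [hsplit]
      rw [List.map_append, List.sum_append, s1, s2]
    · intro t
      conv_rhs => rw [hsplit]
      rw [List.map_append, List.any_append, Bool.or_eq_true, ← m1 t, ← m2 t,
        gt_iff_lt, lt_max_iff]

-- A's fused loop in closed any/sum form
theorem pvALoop_eq (genes : List (List String)) (max_n : Int) (summa : Int) :
    pvALoop genes max_n summa =
      (if (genes.map pvC).any (fun c => decide (c > max_n)) then 1
       else summa + (genes.map pvC).sum) := by
  induction genes generalizing summa with
  | nil => simp [pvALoop]
  | cons g rest ih =>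
    simp only [pvALoop, pv_semi_eq_count, List.map_cons, List.any_cons, List.sum_cons, ih]
    by_cases h : pvC g > max_n
    · simp [h]
    · have hb : decide (pvC g > max_n) = false := decide_eq_false h
      simp only [gt_iff_lt] at h hb
      simp only [if_neg h, hb, Bool.false_or]
      split_ifs with h2
      · rfl
      · ring

-- ===== VERDICT (by name: the statement is the Claim_ definition above) =====
theorem cardinality_constraint_of_permission_spec : Claim_equal_cardinality_constraint_of_permission := by
  intro individual max_n _ _
  unfold Spec_cardinality_constraint_of_permission cardinality_constraint_of_permission cardinality_constraint_of_permission_alt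
  set genes := (PySem.List.pyGet? individual 1).getD [] with hg
  rw [pvALoop_eq]
  by_cases hne : genes = []
  · simp [hne]
  · obtain ⟨hs, hm⟩ := pvAgg_spec genes hne
    rw [if_neg (by simp [hne] : ¬ genes.isEmpty = true)]
    by_cases hb : (pvAgg genes).2 > max_n
    · rw [if_pos ((hm max_n).mp hb), if_pos hb]
    · rw [if_neg (fun h => hb ((hm max_n).mpr h)), if_neg hb, hs]
      simp
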